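-- pv_equiv track=rewrite | github.com/david12345abc/DashboardBack | getkpi/techdir_fot_fact.py | collect_subtree
-- ===== SOURCE A (Python) =====
-- def collect_subtree(root_key: str, by_parent):
--     keys = set()
--     stack = [root_key]
--     while stack:
--         current = stack.pop()
--         if current in keys:
--             continue
--         keys.add(current)
--         for child in by_parent.get(current, []):
--             child_key = child.get("Ref_Key")
--             if child_key:
--                 stack.append(child_key)
--     return keys
-- ===== SOURCE B (Python) =====
-- def collect_subtree(root_key: str, by_parent):
--     # Recursive DFS instead of an explicit stack; children are taken last-first,
--     # which does not change the resulting set.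
--     keys = set()
--
--     def visit(key):
--         if key in keys:
--             return
--         keys.add(key)
--         for child in reversed(by_parent.get(key, [])):
--             child_key = child.get("Ref_Key")
--             if child_key:
--                 visit(child_key)
--
--     visit(root_key)
--     return keys
-- ===== Notes on version B (the rewrite author's own statement) =====
-- stated objective: alternative
-- what changed: Replaces the explicit-stack while loop with a recursive DFS helper that checks the visited set on entry and recurses over the children of each key.
import Mathlib
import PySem

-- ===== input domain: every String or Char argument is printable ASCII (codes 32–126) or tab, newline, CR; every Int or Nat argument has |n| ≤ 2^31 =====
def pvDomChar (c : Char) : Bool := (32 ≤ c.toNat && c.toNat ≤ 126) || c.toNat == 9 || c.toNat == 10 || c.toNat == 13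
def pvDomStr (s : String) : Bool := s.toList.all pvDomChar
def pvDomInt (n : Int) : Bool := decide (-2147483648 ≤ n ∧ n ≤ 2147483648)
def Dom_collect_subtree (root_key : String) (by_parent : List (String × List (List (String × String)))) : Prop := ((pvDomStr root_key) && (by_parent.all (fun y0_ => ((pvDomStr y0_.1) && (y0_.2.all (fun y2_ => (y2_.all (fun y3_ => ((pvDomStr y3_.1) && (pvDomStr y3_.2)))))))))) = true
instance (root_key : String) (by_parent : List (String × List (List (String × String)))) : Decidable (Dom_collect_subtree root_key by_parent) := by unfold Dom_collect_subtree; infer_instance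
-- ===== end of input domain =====

-- B replaces A's explicit-stack loop with a recursive DFS helper (entry-check on the visited
-- set, recursion over each key's children); same guards, same resulting set.
-- Both ports are total via a fuel argument (1 + total number of child entries), which bounds
-- the number of pops/visits and is never exhausted on a real run; fuel is threaded so that
-- both ports consume one unit per processed key.

-- shared helper: the truthy "Ref_Key" values of the children listed under key k
-- (dict lookups are first-match; a missing "Ref_Key" or "" is falsy and skipped)
def pvChildKeys (by_parent : List (String × List (List (String × String)))) (k : String) : List String :=
  (PySem.Dict.getD (PySem.Dict.mk by_parent) k []).foldl (fun acc child =>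
    match PySem.Dict.get? (PySem.Dict.mk child) "Ref_Key" with
    | some ck => if ck ≠ "" then acc ++ [ck] else acc
    | none => acc) []

def pvFuel (by_parent : List (String × List (List (String × String)))) : Nat :=
  1 + by_parent.foldl (fun a p => a + p.2.length) 0

-- ===== PORT A =====
-- A's while loop over the stack; the stack is modelled head-as-top, so pushing the children
-- one by one (append/pop at the Python list's end) prepends them in reverse order.
def pvLoopA (by_parent : List (String × List (List (String × String)))) :
    Nat → List String → PySem.Set String → PySem.Set String
  | _, [], keys => keys
  | 0, _ :: _, keys => keys
  | fuel + 1, current :: rest, keys =>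
    if PySem.Set.contains keys current then
      pvLoopA by_parent fuel rest keys
    else
      pvLoopA by_parent fuel ((pvChildKeys by_parent current).reverse ++ rest)
        (PySem.Set.add keys current)

def collect_subtree (root_key : String) (by_parent : List (String × List (List (String × String)))) : List String :=
  pvLoopA by_parent (pvFuel by_parent) [root_key] PySem.Set.empty

-- ===== PORT B =====
-- B's recursive visit / iteration over a key's children, with the fuel threaded through the
-- calls; the returned fuel is bounded by the input fuel (the subtype carries that bound,
-- which makes the mutual recursion terminate).
mutual
def pvVisit (by_parent : List (String × List (List (String × String)))) :
    (fuel : Nat) → String → PySem.Set String → {r : Nat × PySem.Set String // r.1 ≤ fuel}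
  | 0, _, keys => ⟨(0, keys), le_refl 0⟩
  | fuel + 1, key, keys =>
    if PySem.Set.contains keys key then ⟨(fuel, keys), Nat.le_succ fuel⟩
    else
      let r := pvVisitList by_parent fuel ((pvChildKeys by_parent key).reverse)
        (PySem.Set.add keys key)
      ⟨r.1, Nat.le_succ_of_le r.2⟩
  termination_by fuel _ _ => (fuel, 0)
  decreasing_by exact Prod.Lex.left _ _ (Nat.lt_succ_self fuel)
def pvVisitList (by_parent : List (String × List (List (String × String)))) :
    (fuel : Nat) → List String → PySem.Set String → {r : Nat × PySem.Set String // r.1 ≤ fuel}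
  | fuel, [], keys => ⟨(fuel, keys), le_refl fuel⟩
  | fuel, k :: rest, keys =>
    let r := pvVisit by_parent fuel k keys
    let r' := pvVisitList by_parent r.1.1 rest r.1.2
    ⟨r'.1, le_trans r'.2 r.2⟩
  termination_by fuel ks _ => (fuel, ks.length + 1)
  decreasing_by
    · exact Prod.Lex.right fuel (by simp)
    · rcases lt_or_eq_of_le r.2 with h | h
      · exact Prod.Lex.left _ _ h
      · rw [h]; exact Prod.Lex.right fuel (by simp)
end

def collect_subtree_alt (root_key : String) (by_parent : List (String × List (List (String × String)))) : List String :=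
  (pvVisit by_parent (pvFuel by_parent) root_key PySem.Set.empty).1.2

-- ===== PRECONDITION & SPEC =====
def Spec_collect_subtree (root_key : String) (by_parent : List (String × List (List (String × String)))) (out : List String) : Prop := out = collect_subtree_alt root_key by_parent
instance (root_key : String) (by_parent : List (String × List (List (String × String)))) (out : List String) : Decidable (Spec_collect_subtree root_key by_parent out) := by unfold Spec_collect_subtree; infer_instance

-- ===== CLAIM (what is proved, stated in full; the proofs are below) =====
def Claim_equal_collect_subtree : Prop := ∀ (root_key : String) (by_parent : List (String × List (List (String × String)))), Dom_collect_subtree root_key by_parent → Spec_collect_subtree root_key by_parent (collect_subtree root_key by_parent)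

-- ===== LEMMAS AND PROOFS =====

-- ===== VERDICT (by name: the statement is the Claim_ definition above) =====
-- with no fuel left, the recursive side does nothing
lemma pvVisitList_zero (bp : List (String × List (List (String × String))))
    (ks : List String) (keys : PySem.Set String) :
    (pvVisitList bp 0 ks keys).1 = (0, keys) := by
  induction ks with
  | nil => simp [pvVisitList]
  | cons k rest ih =>
    have h0 : (pvVisit bp 0 k keys).1 = (0, keys) := by simp [pvVisit]
    simp only [pvVisitList]
    rw [h0]
    exact ih

lemma pvLoopA_nil (bp : List (String × List (List (String × String))))
    (fuel : Nat) (keys : PySem.Set String) : pvLoopA bp fuel [] keys = keys := by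
  cases fuel <;> simp [pvLoopA]

-- the key correspondence: running the stack machine on ks ++ stack is running the recursive
-- visitor on ks (threading the fuel) and then the stack machine on the remaining stack
lemma pvLoopA_eq_visitList (bp : List (String × List (List (String × String)))) :
    ∀ fuel ks stack keys,
      pvLoopA bp fuel (ks ++ stack) keys =
        pvLoopA bp (pvVisitList bp fuel ks keys).1.1 stack (pvVisitList bp fuel ks keys).1.2 := by
  intro fuel
  induction fuel using Nat.strong_induction_on with
  | _ fuel IH =>
    intro ks stack keys
    cases ks with
    | nil => simp [pvVisitList]
    | cons k rest =>
      cases fuel with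
      | zero =>
        rw [pvVisitList_zero]
        cases stack with
        | nil => simp [pvLoopA]
        | cons s st => simp [pvLoopA]
      | succ f =>
        by_cases hk : k ∈ keys
        · have hstep : pvLoopA bp (f + 1) ((k :: rest) ++ stack) keys
              = pvLoopA bp f (rest ++ stack) keys := by
            simp [pvLoopA, hk]
          have hv : (pvVisit bp (f + 1) k keys).1 = (f, keys) := by
            simp [pvVisit, hk]
          have hvl : (pvVisitList bp (f + 1) (k :: rest) keys).1
              = (pvVisitList bp f rest keys).1 := by
            simp only [pvVisitList]
            rw [hv]
          rw [hstep, hvl, IH f (Nat.lt_succ_self f)]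
        · have hstep : pvLoopA bp (f + 1) ((k :: rest) ++ stack) keys
              = pvLoopA bp f ((pvChildKeys bp k).reverse ++ (rest ++ stack))
                  (PySem.Set.add keys k) := by
            simp [pvLoopA, hk]
          have hv : (pvVisit bp (f + 1) k keys).1
              = (pvVisitList bp f ((pvChildKeys bp k).reverse) (PySem.Set.add keys k)).1 := by
            simp [pvVisit, hk]
          have hvl : (pvVisitList bp (f + 1) (k :: rest) keys).1
              = (pvVisitList bp (pvVisit bp (f + 1) k keys).1.1 rest
                  (pvVisit bp (f + 1) k keys).1.2).1 := by
            simp [pvVisitList]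
          have hle : (pvVisit bp (f + 1) k keys).1.1 ≤ f := by
            rw [hv]; exact (pvVisitList bp f _ _).2
          rw [hstep, IH f (Nat.lt_succ_self f), ← hv,
            IH (pvVisit bp (f + 1) k keys).1.1 (Nat.lt_succ_of_le hle), hvl]

theorem collect_subtree_spec : Claim_equal_collect_subtree := by
  intro root_key by_parent _
  unfold Spec_collect_subtree collect_subtree collect_subtree_alt
  have h := pvLoopA_eq_visitList by_parent (pvFuel by_parent) [root_key] [] PySem.Set.empty
  simp only [List.append_nil] at h
  rw [h]
  have h1 : (pvVisitList by_parent (pvFuel by_parent) [root_key] PySem.Set.empty).1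
      = (pvVisit by_parent (pvFuel by_parent) root_key PySem.Set.empty).1 := by
    simp [pvVisitList]
  rw [h1, pvLoopA_nil]
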